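-- pv_equiv track=rewrite | github.com/supun64/31-Card-Game | GameMain.py | max_total
-- ===== SOURCE A (Python) =====
-- def max_total(cards_hand):
--     """
--     This will return the total value of a list of card list
--     :param cards_hand: list of cards
--     :return: max value of a single suit cards
--     """
--     card_sum = {"S": 0, "C": 0, "H": 0, "D": 0}
--     pack_value = {"A": 11, "K": 10, "Q": 10, "J": 10, "10": 10, "9": 9,
--                   "8": 8, "7": 7, "6": 6, "5": 5, "4": 4, "3": 3, "2": 2}
--
--     # This loop will get the total of each suit
--     for card in cards_hand:
--         suit = card[0]
--         if suit == "S":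
--             card_sum["S"] += pack_value[card[1:]]
--         elif suit == "C":
--             card_sum["C"] += pack_value[card[1:]]
--         elif suit == "D":
--             card_sum["D"] += pack_value[card[1:]]
--         elif suit == "H":
--             card_sum["H"] += pack_value[card[1:]]
--
--     return max(list(card_sum.values()))
-- ===== SOURCE B (Python) =====
-- def max_total(cards_hand):
--     pack_value = {"A": 11, "K": 10, "Q": 10, "J": 10, "10": 10, "9": 9,
--                   "8": 8, "7": 7, "6": 6, "5": 5, "4": 4, "3": 3, "2": 2}
--     return max(sum(pack_value[c[1:]] for c in cards_hand if c[:1] == s)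
--                for s in "SCHD")
-- ===== Notes on version B (the rewrite author's own statement) =====
-- stated objective: simpler
-- what changed: Replaces the single accumulating pass with a four-way if/elif chain over a mutable dict by a direct 'max over the four fixed suits of the sum of pack values of that suit's cards' expression.
import Mathlib
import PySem

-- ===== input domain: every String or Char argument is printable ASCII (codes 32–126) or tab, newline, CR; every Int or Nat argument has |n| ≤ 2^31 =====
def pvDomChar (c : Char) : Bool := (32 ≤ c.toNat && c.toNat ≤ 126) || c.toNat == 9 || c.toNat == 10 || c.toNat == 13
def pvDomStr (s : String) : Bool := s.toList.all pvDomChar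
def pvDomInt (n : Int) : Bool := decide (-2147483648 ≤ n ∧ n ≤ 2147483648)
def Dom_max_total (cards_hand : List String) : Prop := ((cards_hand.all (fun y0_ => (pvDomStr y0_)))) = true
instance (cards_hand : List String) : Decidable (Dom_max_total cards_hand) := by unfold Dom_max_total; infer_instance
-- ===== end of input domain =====

-- B replaces A's one accumulating pass with an if/elif chain over a mutable dict
-- by "max over the four fixed suits of the sum of that suit's pack values" (simpler decomposition).


-- shared literal table: pack_value (identical in both Pythons)
def pvPack : PySem.Dict String Int :=
  PySem.Dict.ofList [("A",11),("K",10),("Q",10),("J",10),("10",10),("9",9),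
                     ("8",8),("7",7),("6",6),("5",5),("4",4),("3",3),("2",2)]

-- ===== PORT A =====
-- the loop: card_sum dict updated by the if/elif chain, card by card.
-- card[0] is PySem.Str.pyGet? (none = IndexError, excluded by Pre_);
-- card[1:] is String.ofList (toList.drop 1) (exact for the [1:] slice);
-- pack_value[card[1:]] uses get?; the KeyError case (none) is excluded by Pre_.
def pvLoopA : List String → PySem.Dict String Int → PySem.Dict String Int
  | [], d => d
  | c :: cs, d =>
    let v : Int := (pvPack.get? (String.ofList (c.toList.drop 1))).getD 0
    let d' :=
      if PySem.Str.pyGet? c 0 = some 'S' then d.insert "S" (d.getD "S" 0 + v)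
      else if PySem.Str.pyGet? c 0 = some 'C' then d.insert "C" (d.getD "C" 0 + v)
      else if PySem.Str.pyGet? c 0 = some 'D' then d.insert "D" (d.getD "D" 0 + v)
      else if PySem.Str.pyGet? c 0 = some 'H' then d.insert "H" (d.getD "H" 0 + v)
      else d
    pvLoopA cs d'

def max_total (cards_hand : List String) : Int :=
  let card_sum := PySem.Dict.ofList [("S",(0:Int)),("C",0),("H",0),("D",0)]
  (PySem.List.max? (pvLoopA cards_hand card_sum).values (fun x => x)).getD 0

-- ===== PORT B =====
-- sum(pack_value[c[1:]] for c in cards_hand if c[:1] == s): c[:1] is toList.take 1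
def pvSuitSum (cards_hand : List String) (s : Char) : Int :=
  cards_hand.foldl
    (fun acc c =>
      if c.toList.take 1 = [s] then
        acc + (pvPack.get? (String.ofList (c.toList.drop 1))).getD 0
      else acc) 0

def max_total_alt (cards_hand : List String) : Int :=
  (PySem.List.max? (['S','C','H','D'].map (pvSuitSum cards_hand)) (fun x => x)).getD 0

-- ===== PRECONDITION & SPEC =====
-- Pre_ excludes exactly the inputs where Python A raises: an empty card string
-- (IndexError on card[0]) or a card of one of the four suits whose rank is not
-- a pack_value key (KeyError).
def Pre_max_total (cards_hand : List String) : Prop :=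
  ∀ c ∈ cards_hand, c.toList ≠ [] ∧
    (c.toList.take 1 ∈ [['S'],['C'],['H'],['D']] →
      String.ofList (c.toList.drop 1) ∈
        ["A","K","Q","J","10","9","8","7","6","5","4","3","2"])
instance (cards_hand : List String) : Decidable (Pre_max_total cards_hand) := by
  unfold Pre_max_total; infer_instance
def pvWitness_max_total : List String := ["SA", "S7", "HK", "XZ"]

def Spec_max_total (cards_hand : List String) (out : Int) : Prop := out = max_total_alt cards_hand
instance (cards_hand : List String) (out : Int) : Decidable (Spec_max_total cards_hand out) := by unfold Spec_max_total; infer_instance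

-- ===== CLAIM (what is proved, stated in full; the proofs are below) =====
def Claim_equal_max_total : Prop := ∀ (cards_hand : List String), Dom_max_total cards_hand → Pre_max_total cards_hand → Spec_max_total cards_hand (max_total cards_hand)

-- ===== LEMMAS AND PROOFS =====

-- card[0] == 'x'  ↔  card[:1] == ['x']
theorem pyGet0_eq_take1 (c : String) (x : Char) :
    (PySem.Str.pyGet? c 0 = some x) ↔ c.toList.take 1 = [x] := by
  cases h : c.toList with
  | nil => simp [PySem.Str.pyGet?, PySem.List.pyGet?, h]
  | cons a t => simp [PySem.Str.pyGet?, PySem.List.pyGet?, PySem.List.pyIdx?, h]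

theorem suitSum_shift (cs : List String) (a : Int) (s : Char) :
    cs.foldl (fun acc c => if c.toList.take 1 = [s] then
        acc + (pvPack.get? (String.ofList (c.toList.drop 1))).getD 0 else acc) a
      = a + pvSuitSum cs s := by
  induction cs generalizing a with
  | nil => simp [pvSuitSum]
  | cons c cs ih =>
    simp only [List.foldl_cons, ih]
    conv_rhs => rw [pvSuitSum, List.foldl_cons]
    rw [show cs.foldl (fun acc c => if c.toList.take 1 = [s] then
        acc + (pvPack.get? (String.ofList (c.toList.drop 1))).getD 0 else acc)
        (if c.toList.take 1 = [s] then
          0 + (pvPack.get? (String.ofList (c.toList.drop 1))).getD 0 else 0) = _ from ih _]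
    split_ifs <;> ring

theorem suitSum_cons (c : String) (cs : List String) (s : Char) :
    pvSuitSum (c :: cs) s =
      (if c.toList.take 1 = [s] then (pvPack.get? (String.ofList (c.toList.drop 1))).getD 0 else 0)
      + pvSuitSum cs s := by
  rw [pvSuitSum, List.foldl_cons, suitSum_shift]
  split_ifs <;> ring

theorem loopA_vals (cs : List String) (a b h d : Int) :
    (pvLoopA cs (PySem.Dict.ofList [("S",a),("C",b),("H",h),("D",d)])).values
      = [a + pvSuitSum cs 'S', b + pvSuitSum cs 'C',
         h + pvSuitSum cs 'H', d + pvSuitSum cs 'D'] := by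
  induction cs generalizing a b h d with
  | nil => simp [pvLoopA, pvSuitSum, PySem.Dict.values, PySem.Dict.ofList,
                 PySem.Dict.update, PySem.Dict.empty, PySem.Dict.insert,
                 PySem.Dict.contains]
  | cons c cs ih =>
    rw [pvLoopA]
    simp only [pyGet0_eq_take1, suitSum_cons]
    by_cases h1 : c.toList.take 1 = ['S']
    · simp only [h1]
      simp only [List.cons.injEq, Char.reduceEq, and_true, if_false, if_true, reduceIte]
      rw [show (PySem.Dict.ofList [("S",a),("C",b),("H",h),("D",d)] : PySem.Dict String Int).insert "S"
            ((PySem.Dict.ofList [("S",a),("C",b),("H",h),("D",d)] : PySem.Dict String Int).getD "S" 0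
              + (pvPack.get? (String.ofList (c.toList.drop 1))).getD 0)
          = PySem.Dict.ofList [("S", a + (pvPack.get? (String.ofList (c.toList.drop 1))).getD 0),("C",b),("H",h),("D",d)] from by
        simp [PySem.Dict.insert, PySem.Dict.contains, PySem.Dict.getD, PySem.Dict.get?,
              PySem.Dict.ofList, PySem.Dict.update, PySem.Dict.empty]]
      rw [ih]
      simp [h1, add_assoc]
    · by_cases h2 : c.toList.take 1 = ['C']
      · simp only [h1, h2]
        simp only [List.cons.injEq, Char.reduceEq, and_true, if_false, if_true, reduceIte]
        rw [show (PySem.Dict.ofList [("S",a),("C",b),("H",h),("D",d)] : PySem.Dict String Int).insert "C"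
              ((PySem.Dict.ofList [("S",a),("C",b),("H",h),("D",d)] : PySem.Dict String Int).getD "C" 0
                + (pvPack.get? (String.ofList (c.toList.drop 1))).getD 0)
            = PySem.Dict.ofList [("S",a),("C", b + (pvPack.get? (String.ofList (c.toList.drop 1))).getD 0),("H",h),("D",d)] from by
          simp [PySem.Dict.insert, PySem.Dict.contains, PySem.Dict.getD, PySem.Dict.get?,
                PySem.Dict.ofList, PySem.Dict.update, PySem.Dict.empty]]
        rw [ih]
        simp [h1, h2, add_assoc]
      · by_cases h3 : c.toList.take 1 = ['D']
        · simp only [h1, h2, h3]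
          simp only [List.cons.injEq, Char.reduceEq, and_true, if_false, if_true, reduceIte]
          rw [show (PySem.Dict.ofList [("S",a),("C",b),("H",h),("D",d)] : PySem.Dict String Int).insert "D"
                ((PySem.Dict.ofList [("S",a),("C",b),("H",h),("D",d)] : PySem.Dict String Int).getD "D" 0
                  + (pvPack.get? (String.ofList (c.toList.drop 1))).getD 0)
              = PySem.Dict.ofList [("S",a),("C",b),("H",h),("D", d + (pvPack.get? (String.ofList (c.toList.drop 1))).getD 0)] from by
            simp [PySem.Dict.insert, PySem.Dict.contains, PySem.Dict.getD, PySem.Dict.get?,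
                  PySem.Dict.ofList, PySem.Dict.update, PySem.Dict.empty]]
          rw [ih]
          simp [h1, h2, h3, add_assoc]
        · by_cases h4 : c.toList.take 1 = ['H']
          · simp only [h1, h2, h3, h4]
            simp only [List.cons.injEq, Char.reduceEq, and_true, if_false, if_true, reduceIte]
            rw [show (PySem.Dict.ofList [("S",a),("C",b),("H",h),("D",d)] : PySem.Dict String Int).insert "H"
                  ((PySem.Dict.ofList [("S",a),("C",b),("H",h),("D",d)] : PySem.Dict String Int).getD "H" 0
                    + (pvPack.get? (String.ofList (c.toList.drop 1))).getD 0)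
                = PySem.Dict.ofList [("S",a),("C",b),("H", h + (pvPack.get? (String.ofList (c.toList.drop 1))).getD 0),("D",d)] from by
              simp [PySem.Dict.insert, PySem.Dict.contains, PySem.Dict.getD, PySem.Dict.get?,
                    PySem.Dict.ofList, PySem.Dict.update, PySem.Dict.empty]]
            rw [ih]
            simp [h1, h2, h3, h4, add_assoc]
          · simp only [if_neg h1, if_neg h2, if_neg h3, if_neg h4]
            rw [ih]
            simp [h1, h2, h3, h4]

-- ===== VERDICT (by name: the statement is the Claim_ definition above) =====
theorem max_total_spec : Claim_equal_max_total := by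
  intro cards _ _
  unfold Spec_max_total max_total max_total_alt
  show (PySem.List.max? (pvLoopA cards (PySem.Dict.ofList [("S",0),("C",0),("H",0),("D",0)])).values (fun x => x)).getD 0 = _
  rw [loopA_vals]
  simp [PySem.List.max?_id_cons]
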